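-- pv_equiv track=rewrite | github.com/c64scene-ar/64k-ought-to-be-enough | tools/parse_ibm_charset.py | parse_4_bits
-- ===== SOURCE A (Python) =====
-- def parse_4_bits(byte):
--     """Parses half a byte (4 bits) and returns one byte.
--     Useful when using a 4 color video mode. """
--     masks = [0b0001, 0b0010, 0b0100, 0b1000]
--     # empty is color 2 (0b10)
--     out = 0b10101010
--     for bit in range(len(masks)):
--         mask = byte & masks[bit]
--         if mask != 0:
--             # 0b11 is the color used for the charset
--             out |= 0b11 << (bit * 2)
--     return out
-- ===== SOURCE B (Python) =====
-- def parse_4_bits(byte):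
--     """Parses half a byte (4 bits) and returns one byte.
--     Useful when using a 4 color video mode. """
--     # Spread the low nibble's bits into even positions, double each bit
--     # into a 0b11 pair, and overlay on the all-color-2 background in one shot.
--     n = byte & 0xF
--     n = (n | (n << 2)) & 0x33
--     n = (n | (n << 1)) & 0x55
--     return 0b10101010 | (n * 3)
-- ===== Notes on version B (the rewrite author's own statement) =====
-- stated objective: alternative
-- what changed: Replaces the per-bit mask loop and conditional OR with a branch-free closed-form bit-spread: mask the low nibble, interleave its bits into even positions with two shift/mask steps, multiply by 3 to double each bit into a 0b11 pair, and OR onto the 0b10101010 background.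
import Mathlib
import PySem

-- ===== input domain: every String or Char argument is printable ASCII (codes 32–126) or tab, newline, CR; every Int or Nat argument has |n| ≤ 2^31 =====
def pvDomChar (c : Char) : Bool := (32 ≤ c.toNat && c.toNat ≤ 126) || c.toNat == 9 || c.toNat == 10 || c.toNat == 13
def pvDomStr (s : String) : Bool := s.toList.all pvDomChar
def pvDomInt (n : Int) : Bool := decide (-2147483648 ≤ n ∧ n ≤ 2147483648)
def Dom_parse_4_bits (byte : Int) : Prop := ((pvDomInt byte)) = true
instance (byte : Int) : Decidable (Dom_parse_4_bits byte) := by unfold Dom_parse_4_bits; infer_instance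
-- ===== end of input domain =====

-- B replaces A's per-bit mask loop by a branch-free closed-form nibble bit-spread.

-- ===== PORT A =====
def parse_4_bits (byte : Int) : Int :=
  let masks : List Int := [1, 2, 4, 8]
  (PySem.List.pyRange 0 (masks.length : Int) 1).foldl
    (fun out bit =>
      let mask := PySem.Int.band byte (PySem.List.pyGetD masks bit 0)
      if mask ≠ 0 then PySem.Int.bor out ((3 : Int) <<< (bit * 2).toNat) else out)
    170

-- ===== PORT B =====
def parse_4_bits_alt (byte : Int) : Int :=
  let n0 := PySem.Int.band byte 15
  let n1 := PySem.Int.band (PySem.Int.bor n0 (n0 <<< 2)) 51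
  let n2 := PySem.Int.band (PySem.Int.bor n1 (n1 <<< 1)) 85
  PySem.Int.bor 170 (n2 * 3)

-- ===== PRECONDITION & SPEC =====
def Spec_parse_4_bits (byte : Int) (out : Int) : Prop := out = parse_4_bits_alt byte
instance (byte : Int) (out : Int) : Decidable (Spec_parse_4_bits byte out) := by unfold Spec_parse_4_bits; infer_instance

-- ===== CLAIM (what is proved, stated in full; the proofs are below) =====
def Claim_equal_parse_4_bits : Prop := ∀ (byte : Int), Dom_parse_4_bits byte → Spec_parse_4_bits byte (parse_4_bits byte)

-- ===== LEMMAS AND PROOFS =====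

-- low-16 masks see only n % 16 (Nat level)
lemma nat_and_mod16 (n m : Nat) (hm : m < 16) : (n % 16) &&& m = n &&& m := by
  apply Nat.eq_of_testBit_eq
  intro i
  have h16 : (16 : Nat) = 2 ^ 4 := by norm_num
  rw [Nat.testBit_and, Nat.testBit_and, h16, Nat.testBit_mod_two_pow]
  by_cases hi : i < 4
  · simp [hi]
  · have : m.testBit i = false := by
      apply Nat.testBit_lt_two_pow
      calc m < 16 := hm
        _ = 2 ^ 4 := by norm_num
        _ ≤ 2 ^ i := Nat.pow_le_pow_right (by norm_num) (by omega)
    simp [this]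

-- complement identity on nibble values, finite check
lemma nat_compl : ∀ m < 16, ∀ r < 16, r &&& m = m - (m &&& (15 - r)) := by
  decide

-- band with a small mask depends only on the residue mod 16
lemma band_mod16 (a : Int) (m : Nat) (hm : m < 16) :
    PySem.Int.band a (m : Int) = PySem.Int.band (a % 16) (m : Int) := by
  have hm0 : (0 : Int) ≤ (m : Int) := by positivity
  have hr0 : (0 : Int) ≤ a % 16 := Int.emod_nonneg a (by norm_num)
  have hr16 : a % 16 < 16 := Int.emod_lt_of_pos a (by norm_num)
  by_cases ha : 0 ≤ a
  · have h1 : (a % 16).toNat = a.toNat % 16 := by omega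
    simp only [PySem.Int.band, if_pos ha, if_pos hm0, if_pos hr0, h1,
      Int.toNat_natCast, nat_and_mod16 _ _ hm]
  · have key : (-a - 1).toNat % 16 = 15 - (a % 16).toNat := by omega
    simp only [PySem.Int.band, if_neg ha, if_pos hm0, if_pos hr0, Int.toNat_natCast]
    rw [nat_compl m hm ((a % 16).toNat) (by omega), ← key]
    have h2 : ((-a - 1).toNat % 16) &&& m = (-a - 1).toNat &&& m := nat_and_mod16 _ _ hm
    rw [Nat.and_comm m ((-a - 1).toNat % 16), h2, Nat.and_comm]

lemma nib_cases : ∀ n : Nat, n < 16 → parse_4_bits (n : Int) = parse_4_bits_alt (n : Int) := by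
  decide

theorem parse_4_bits_eq (a : Int) : parse_4_bits a = parse_4_bits_alt a := by
  have hA : parse_4_bits a = parse_4_bits (a % 16) := by
    simp only [parse_4_bits]
    have hrange : PySem.List.pyRange 0 (([1,2,4,8] : List Int).length : Int) 1 = [0, 1, 2, 3] := by decide
    rw [hrange]
    simp only [List.foldl]
    rw [show PySem.List.pyGetD [1,2,4,8] 0 0 = ((1 : Nat) : Int) from by decide,
        show PySem.List.pyGetD [1,2,4,8] 1 0 = ((2 : Nat) : Int) from by decide,
        show PySem.List.pyGetD [1,2,4,8] 2 0 = ((4 : Nat) : Int) from by decide,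
        show PySem.List.pyGetD [1,2,4,8] 3 0 = ((8 : Nat) : Int) from by decide,
        band_mod16 a 1 (by norm_num), band_mod16 a 2 (by norm_num),
        band_mod16 a 4 (by norm_num), band_mod16 a 8 (by norm_num)]
  have hB : parse_4_bits_alt a = parse_4_bits_alt (a % 16) := by
    simp only [parse_4_bits_alt]
    rw [show (15 : Int) = ((15 : Nat) : Int) from rfl, band_mod16 a 15 (by norm_num)]
  have hr0 : (0 : Int) ≤ a % 16 := Int.emod_nonneg a (by norm_num)
  have hr16 : a % 16 < 16 := Int.emod_lt_of_pos a (by norm_num)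
  have hcast : a % 16 = (((a % 16).toNat : Nat) : Int) := by omega
  rw [hA, hB, hcast]
  exact nib_cases _ (by omega)

-- ===== VERDICT (by name: the statement is the Claim_ definition above) =====
theorem parse_4_bits_spec : Claim_equal_parse_4_bits := by
  intro byte _
  exact parse_4_bits_eq byte
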